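-- pv_equiv track=rewrite | github.com/saisudheerakkireddy/genai_projects | extracted_projects/Pardhasarathireddy-GroupAX-Pardha-9fa8bfd/agents/doc_generator.py | _insert_docstring
-- ===== SOURCE A (Python) =====
-- from typing import List, Dict
--
-- def _insert_docstring(content: str, func: Dict, docstring: str) -> str:
--     """
--     Insert docstring into function
--     """
--     lines = content.split('\n')
--
--     # Find function definition line
--     for i, line in enumerate(lines):
--         if f"def {func['name']}" in line:
--             # Insert docstring after function definition
--             indent = len(line) - len(line.lstrip())
--             docstring_lines = [' ' * (indent + 4) + docstring]
--             lines.insert(i + 1, '\n'.join(docstring_lines))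
--             break
--
--     return '\n'.join(lines)
-- ===== SOURCE B (Python) =====
-- def _insert_docstring(content: str, func, docstring: str) -> str:
--     """
--     Stream the text with str.partition('\n'): splice the indented docstring
--     right after the first line mentioning the function, never building the
--     full line list.
--     """
--     pattern = "def " + func['name']
--     pieces = []
--     rest = content
--     while True:
--         head, sep, tail = rest.partition('\n')
--         if pattern in head:
--             pad = len(head) - len(head.lstrip())
--             pieces.append(head + '\n' + ' ' * (pad + 4) + docstring + sep + tail)
--             return ''.join(pieces)
--         if not sep:
--             return content
--         pieces.append(head + sep)
--         rest = tail
-- ===== Notes on version B (the rewrite author's own statement) =====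
-- stated objective: alternative
-- what changed: Instead of splitting the whole text into a line list, scanning it with enumerate, mutating it with list.insert and rejoining, B streams through the raw string with str.partition('\n'), accumulating finished pieces and splicing the docstring line directly into the remainder at the first match, so no line list is ever built and scanning stops at the match.
import Mathlib
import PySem

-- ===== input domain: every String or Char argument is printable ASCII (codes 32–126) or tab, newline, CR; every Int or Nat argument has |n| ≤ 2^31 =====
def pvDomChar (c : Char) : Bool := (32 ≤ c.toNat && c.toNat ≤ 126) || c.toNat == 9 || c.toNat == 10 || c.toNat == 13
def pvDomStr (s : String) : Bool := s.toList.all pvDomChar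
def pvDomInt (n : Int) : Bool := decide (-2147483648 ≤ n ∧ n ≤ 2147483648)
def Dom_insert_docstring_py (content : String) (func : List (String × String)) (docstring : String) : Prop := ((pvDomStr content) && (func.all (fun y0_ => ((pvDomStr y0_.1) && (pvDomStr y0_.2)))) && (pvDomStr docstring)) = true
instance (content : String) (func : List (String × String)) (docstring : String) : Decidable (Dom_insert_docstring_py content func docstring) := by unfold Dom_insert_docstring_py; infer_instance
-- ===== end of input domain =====

-- B replaces A's split-into-line-list / enumerate / list.insert / rejoin by a single
-- partition('\n') stream over the raw string that splices the docstring line in directly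
-- (objective: alternative; same O(n) cost).

-- ===== PORT A =====
-- the 'for i, line in enumerate(lines): if f"def {name}" in line: … break' loop of A:
-- returns the index of the first matching line together with the docstring line built there
def pvAFind (pattern docstring : String) : List String → Nat → Option (Nat × String)
  | [], _ => none
  | line :: ls, i =>
    if PySem.Str.isIn pattern line then
      let indent : Int := PySem.Str.len line - PySem.Str.len (PySem.Str.lstrip line)
      some (i, PySem.Str.join "\n" [String.ofList (List.replicate (indent + 4).toNat ' ') ++ docstring])
    else pvAFind pattern docstring ls (i + 1)

def insert_docstring_py (content : String) (func : List (String × String)) (docstring : String) : String :=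
  let lines := (PySem.Str.split? content "\n").getD []
  match (PySem.Dict.mk func).get? "name" with
  | none => content        -- Python raises KeyError here (lines is never empty); excluded by Pre_
  | some name =>
    match pvAFind ("def " ++ name) docstring lines 0 with
    | none => PySem.Str.join "\n" lines
    | some (i, docline) => PySem.Str.join "\n" (PySem.List.insert lines ((i : Int) + 1) docline)

-- ===== PORT B =====
-- str.partition('\n'), hand-ported (exact for this single-character separator):
-- (text before the first newline, whether a newline occurs, text after it)
def pvPartNl (cs : List Char) : List Char × Bool × List Char :=
  match cs.dropWhile (· != '\n') with
  | [] => (cs.takeWhile (· != '\n'), false, [])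
  | _ :: t => (cs.takeWhile (· != '\n'), true, t)

theorem pvPartNl_tail_lt (cs head tail : List Char) (h : pvPartNl cs = (head, true, tail)) :
    tail.length < cs.length := by
  unfold pvPartNl at h
  rcases hd : cs.dropWhile (· != '\n') with _ | ⟨c, t⟩ <;> rw [hd] at h
  · simp at h
  · have hlen := List.length_dropWhile_le (· != '\n') cs
    rw [hd] at hlen
    simp only [Prod.mk.injEq] at h
    obtain ⟨-, -, h2⟩ := h
    subst h2
    simp at hlen
    omega

-- the 'while True' loop of B over (pieces, rest)
def pvBLoop (pattern docstring : List Char) (pieces : List (List Char)) (rest : List Char) :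
    Option (List Char) :=
  match hp : pvPartNl rest with
  | (head, sep, tail) =>
    if PySem.Chars.isIn pattern head then
      let pad := head.length - (PySem.Chars.lstrip head).length
      some (PySem.Chars.join []
        (pieces ++ [head ++ '\n' :: (List.replicate (pad + 4) ' ' ++ docstring ++ (if sep then ['\n'] else []) ++ tail)]))
    else if !sep then none
    else pvBLoop pattern docstring (pieces ++ [head ++ ['\n']]) tail
termination_by rest.length
decreasing_by
  rename_i _h1 h2
  have hsep : sep = true := by revert h2; cases sep <;> simp
  exact pvPartNl_tail_lt rest head tail (hsep ▸ hp)

def insert_docstring_py_alt (content : String) (func : List (String × String)) (docstring : String) : String :=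
  match (PySem.Dict.mk func).get? "name" with
  | none => content        -- Python raises KeyError here; excluded by Pre_
  | some name =>
    match pvBLoop ("def " ++ name).toList docstring.toList [] content.toList with
    | none => content
    | some out => String.ofList out

-- ===== PRECONDITION & SPEC =====
-- Pre_ excludes exactly the inputs where func has no "name" key, on which Python A
-- (and B alike) raises KeyError.
def Pre_insert_docstring_py (content : String) (func : List (String × String)) (docstring : String) : Prop :=
  ((PySem.Dict.mk func).get? "name").isSome = true

instance (content : String) (func : List (String × String)) (docstring : String) : Decidable (Pre_insert_docstring_py content func docstring) := by unfold Pre_insert_docstring_py; infer_instance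

def pvWitness_insert_docstring_py : String × (List (String × String)) × String :=
  ("def f(x):\n    return x", [("name", "f")], "\"\"\"doc\"\"\"")

def Spec_insert_docstring_py (content : String) (func : List (String × String)) (docstring : String) (out : String) : Prop := out = insert_docstring_py_alt content func docstring
instance (content : String) (func : List (String × String)) (docstring : String) (out : String) : Decidable (Spec_insert_docstring_py content func docstring out) := by unfold Spec_insert_docstring_py; infer_instance

-- ===== CLAIM (what is proved, stated in full; the proofs are below) =====
def Claim_equal_insert_docstring_py : Prop := ∀ (content : String) (func : List (String × String)) (docstring : String), Dom_insert_docstring_py content func docstring → Pre_insert_docstring_py content func docstring → Spec_insert_docstring_py content func docstring (insert_docstring_py content func docstring)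

-- ===== LEMMAS AND PROOFS =====

-- split of cs at every '\n' (proof-side normal form of content.split('\n'))
def pvSplitNl (cs : List Char) : List (List Char) :=
  match hd : cs.dropWhile (· != '\n') with
  | [] => [cs.takeWhile (· != '\n')]
  | _ :: t =>
    have : t.length < cs.length := by
      have := List.length_dropWhile_le (· != '\n') cs
      rw [hd] at this; simp at this; omega
    cs.takeWhile (· != '\n') :: pvSplitNl t
termination_by cs.length

def pvConsHead (p : List Char) : List (List Char) → List (List Char)
  | [] => [p]
  | x :: xs => (p ++ x) :: xs

-- proof-side normal form of B's loop without its accumulator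
def pvG (p doc : List Char) (cs : List Char) : Option (List Char) :=
  match hd : cs.dropWhile (· != '\n') with
  | [] =>
    if PySem.Chars.isIn p (cs.takeWhile (· != '\n')) then
      some (cs.takeWhile (· != '\n') ++ '\n' ::
        (List.replicate ((cs.takeWhile (· != '\n')).length - (PySem.Chars.lstrip (cs.takeWhile (· != '\n'))).length + 4) ' ' ++ doc))
    else none
  | _ :: t =>
    have : t.length < cs.length := by
      have := List.length_dropWhile_le (· != '\n') cs
      rw [hd] at this; simp at this; omega
    if PySem.Chars.isIn p (cs.takeWhile (· != '\n')) then
      some (cs.takeWhile (· != '\n') ++ '\n' ::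
        (List.replicate ((cs.takeWhile (· != '\n')).length - (PySem.Chars.lstrip (cs.takeWhile (· != '\n'))).length + 4) ' ' ++ doc ++ '\n' :: t))
    else (pvG p doc t).map (fun o => cs.takeWhile (· != '\n') ++ '\n' :: o)
termination_by cs.length

theorem pvSplitNl_nil_eq (cs : List Char) (hd : cs.dropWhile (· != '\n') = []) :
    pvSplitNl cs = [cs.takeWhile (· != '\n')] := by
  rw [pvSplitNl]
  split
  · rfl
  · rename_i heq; rw [hd] at heq; cases heq

theorem pvSplitNl_cons_eq (cs : List Char) (c : Char) (t : List Char)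
    (hd : cs.dropWhile (· != '\n') = c :: t) :
    pvSplitNl cs = cs.takeWhile (· != '\n') :: pvSplitNl t := by
  rw [pvSplitNl]
  split
  · rename_i heq; rw [hd] at heq; cases heq
  · rename_i x y heq; rw [hd] at heq; cases heq; rfl

theorem pvG_nil_eq (p doc cs : List Char) (hd : cs.dropWhile (· != '\n') = []) :
    pvG p doc cs =
      (if PySem.Chars.isIn p (cs.takeWhile (· != '\n')) then
        some (cs.takeWhile (· != '\n') ++ '\n' ::
          (List.replicate ((cs.takeWhile (· != '\n')).length - (PySem.Chars.lstrip (cs.takeWhile (· != '\n'))).length + 4) ' ' ++ doc))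
      else none) := by
  rw [pvG]
  split
  · rfl
  · rename_i x y heq; rw [hd] at heq; cases heq

theorem pvG_cons_eq (p doc cs : List Char) (c : Char) (t : List Char)
    (hd : cs.dropWhile (· != '\n') = c :: t) :
    pvG p doc cs =
      (if PySem.Chars.isIn p (cs.takeWhile (· != '\n')) then
        some (cs.takeWhile (· != '\n') ++ '\n' ::
          (List.replicate ((cs.takeWhile (· != '\n')).length - (PySem.Chars.lstrip (cs.takeWhile (· != '\n'))).length + 4) ' ' ++ doc ++ '\n' :: t))
      else (pvG p doc t).map (fun o => cs.takeWhile (· != '\n') ++ '\n' :: o)) := by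
  rw [pvG]
  split
  · rename_i heq; rw [hd] at heq; cases heq
  · rename_i x y heq; rw [hd] at heq; cases heq; rfl

theorem pvSplitNl_ne_nil (cs : List Char) : pvSplitNl cs ≠ [] := by
  rcases hd : cs.dropWhile (· != '\n') with _ | ⟨c, t⟩
  · rw [pvSplitNl_nil_eq cs hd]; simp
  · rw [pvSplitNl_cons_eq cs c t hd]; simp

theorem pvDropWhile_head {α : Type} (q : α → Bool) (l : List α) (c : α) (t : List α)
    (hd : l.dropWhile q = c :: t) : q c = false := by
  induction l with
  | nil => cases hd
  | cons a l' ih =>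
    rw [List.dropWhile_cons] at hd
    by_cases ha : q a = true
    · rw [if_pos ha] at hd; exact ih hd
    · rw [if_neg ha] at hd
      cases hd
      simpa using ha

theorem pvSplitNl_go (fuel : Nat) : ∀ (l cur : List Char) (accs : List (List Char)),
    l.length ≤ fuel →
    PySem.Chars.splitOn.go ['\n'] fuel l cur accs = accs.reverse ++ pvConsHead cur.reverse (pvSplitNl l) := by
  induction fuel with
  | zero =>
    intro l cur accs hl
    have hnil : l = [] := by cases l <;> simp_all
    subst hnil
    rw [pvSplitNl_nil_eq [] (by simp)]
    simp [PySem.Chars.splitOn.go, pvConsHead]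
  | succ n ih =>
    intro l cur accs hl
    cases l with
    | nil =>
      rw [pvSplitNl_nil_eq [] (by simp)]
      simp [PySem.Chars.splitOn.go, pvConsHead]
    | cons c rest =>
      by_cases hc : c = '\n'
      · subst hc
        have hstep : PySem.Chars.splitOn.go ['\n'] (n+1) ('\n' :: rest) cur accs
            = PySem.Chars.splitOn.go ['\n'] n rest [] (cur.reverse :: accs) := by
          simp [PySem.Chars.splitOn.go, List.isPrefixOf]
        rw [hstep, ih rest [] (cur.reverse :: accs) (by simpa using hl)]
        rw [pvSplitNl_cons_eq ('\n' :: rest) '\n' rest (by simp)]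
        rcases hs : pvSplitNl rest with _ | ⟨x, xs⟩
        · exact absurd hs (pvSplitNl_ne_nil rest)
        · simp [pvConsHead]
      · have hstep : PySem.Chars.splitOn.go ['\n'] (n+1) (c :: rest) cur accs
            = PySem.Chars.splitOn.go ['\n'] n rest (c :: cur) accs := by
          simp [PySem.Chars.splitOn.go, List.isPrefixOf, Ne.symm hc]
        rw [hstep, ih rest (c :: cur) accs (by simpa using hl)]
        have htk : (c :: rest).takeWhile (· != '\n') = c :: rest.takeWhile (· != '\n') := by
          simp [hc]
        have hdw : (c :: rest).dropWhile (· != '\n') = rest.dropWhile (· != '\n') := by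
          simp [hc]
        rcases hd : rest.dropWhile (· != '\n') with _ | ⟨y, t⟩
        · rw [pvSplitNl_nil_eq rest hd, pvSplitNl_nil_eq (c :: rest) (by rw [hdw, hd]), htk]
          simp [pvConsHead]
        · rw [pvSplitNl_cons_eq rest y t hd, pvSplitNl_cons_eq (c :: rest) y t (by rw [hdw, hd]), htk]
          simp [pvConsHead]

theorem pvSplitOn_eq (cs : List Char) : PySem.Chars.splitOn cs ['\n'] = pvSplitNl cs := by
  unfold PySem.Chars.splitOn
  rw [pvSplitNl_go (cs.length + 1) cs [] [] (by omega)]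
  rcases hs : pvSplitNl cs with _ | ⟨x, xs⟩
  · exact absurd hs (pvSplitNl_ne_nil cs)
  · simp [pvConsHead]

theorem pvJoin_flatten (ps : List (List Char)) : PySem.Chars.join [] ps = ps.flatten := by
  induction ps with
  | nil => simp [PySem.Chars.join, List.intercalate]
  | cons a t ih =>
    cases t <;> simp_all [PySem.Chars.join, List.intercalate, List.intersperse]

theorem pvJoin_cons (x : List Char) (xs : List (List Char)) :
    PySem.Chars.join ['\n'] (x :: xs) = x ++ if xs = [] then [] else '\n' :: PySem.Chars.join ['\n'] xs := by
  cases xs <;> simp [PySem.Chars.join, List.intercalate]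

theorem pvJoin_splitNl (cs : List Char) : PySem.Chars.join ['\n'] (pvSplitNl cs) = cs := by
  rcases hd : cs.dropWhile (· != '\n') with _ | ⟨c, t⟩
  · rw [pvSplitNl_nil_eq cs hd, pvJoin_cons]
    have := List.takeWhile_append_dropWhile (p := (· != '\n')) (l := cs)
    rw [hd] at this
    simpa using this
  · have : t.length < cs.length := by
      have := List.length_dropWhile_le (· != '\n') cs
      rw [hd] at this; simp at this; omega
    have hc : c = '\n' := by
      have := pvDropWhile_head (· != '\n') cs c t hd
      simpa using this
    rw [pvSplitNl_cons_eq cs c t hd, pvJoin_cons, if_neg (pvSplitNl_ne_nil t), pvJoin_splitNl t]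
    have hcs := List.takeWhile_append_dropWhile (p := (· != '\n')) (l := cs)
    rw [hd, hc] at hcs
    exact hcs
termination_by cs.length

theorem pvInsert_nat {α : Type} (xs : List α) (i : Nat) (v : α) :
    PySem.List.insert xs (i : Int) v = xs.take i ++ v :: xs.drop i := by
  unfold PySem.List.insert PySem.List.sliceIndices
  norm_num
  rw [if_neg (by omega : ¬((i : Int) < 0))]
  by_cases h : i ≤ xs.length
  · rw [show (min (i : Int) (xs.length : Int)).toNat = i by omega]
  · rw [show (min (i : Int) (xs.length : Int)).toNat = xs.length by omega,
        List.take_of_length_le (by omega : xs.length ≤ xs.length),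
        List.take_of_length_le (by omega : xs.length ≤ i),
        List.drop_eq_nil_of_le (by omega : xs.length ≤ xs.length),
        List.drop_eq_nil_of_le (by omega : xs.length ≤ i)]

-- char-level analogue of pvAFind
def pvAFindC (p doc : List Char) : List (List Char) → Nat → Option (Nat × List Char)
  | [], _ => none
  | l :: ls, i =>
    if PySem.Chars.isIn p l then
      some (i, List.replicate ((l.length : Int) - ((PySem.Chars.lstrip l).length : Int) + 4).toNat ' ' ++ doc)
    else pvAFindC p doc ls (i + 1)

theorem pvAFind_map (P D : String) (ls : List (List Char)) : ∀ (i : Nat),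
    pvAFind P D (ls.map String.ofList) i =
      (pvAFindC P.toList D.toList ls i).map (fun r => (r.1, String.ofList r.2)) := by
  induction ls with
  | nil => intro i; rfl
  | cons l ls ih =>
    intro i
    simp only [List.map_cons, pvAFind, pvAFindC]
    have hin : PySem.Str.isIn P (String.ofList l) = PySem.Chars.isIn P.toList l := by
      simp [PySem.Str.isIn]
    rw [hin]
    by_cases hl : PySem.Chars.isIn P.toList l = true
    · rw [if_pos hl, if_pos hl]
      have hjoin : ∀ (x : String), PySem.Str.join "\n" [x] = x := by
        intro x
        simp only [PySem.Str.join, List.map_cons, List.map_nil, PySem.Chars.join]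
        rw [show List.intercalate "\n".toList [x.toList] = x.toList from by simp [List.intercalate]]
        exact String.ofList_toList
      have hlen : PySem.Str.len (String.ofList l) = (l.length : Int) := by
        simp [PySem.Str.len]
      have hls : PySem.Str.len (PySem.Str.lstrip (String.ofList l)) = ((PySem.Chars.lstrip l).length : Int) := by
        simp [PySem.Str.len, PySem.Str.lstrip]
      have hcat : ∀ (a : List Char), String.ofList (a ++ D.toList) = String.ofList a ++ D := by
        intro a
        rw [String.ofList_append, String.ofList_toList]
      rw [hjoin, hlen, hls]
      simp only [Option.map_some, hcat]
    · rw [if_neg hl, if_neg hl, ih (i + 1)]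

theorem pvAFindC_shift (p doc : List Char) (ls : List (List Char)) : ∀ (k : Nat),
    pvAFindC p doc ls (k + 1) = (pvAFindC p doc ls k).map (fun r => (r.1 + 1, r.2)) := by
  induction ls with
  | nil => intro k; rfl
  | cons l ls ih =>
    intro k
    simp only [pvAFindC]
    by_cases hl : PySem.Chars.isIn p l = true
    · simp [hl]
    · simp only [if_neg hl]
      exact ih (k + 1)

theorem pvLstrip_len_le (l : List Char) : (PySem.Chars.lstrip l).length ≤ l.length :=
  List.length_dropWhile_le _ l

theorem pvPad_toNat (l : List Char) :
    ((l.length : Int) - ((PySem.Chars.lstrip l).length : Int) + 4).toNat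
      = l.length - (PySem.Chars.lstrip l).length + 4 := by
  have := pvLstrip_len_le l
  omega

-- A's whole char-level value equals B's
theorem pvCentral (p doc cs : List Char) :
    PySem.Chars.join ['\n']
      (match pvAFindC p doc (pvSplitNl cs) 0 with
       | none => pvSplitNl cs
       | some (i, d) => (pvSplitNl cs).take (i + 1) ++ d :: (pvSplitNl cs).drop (i + 1)) =
    (pvG p doc cs).getD cs := by
  rcases hd : cs.dropWhile (· != '\n') with _ | ⟨c, t⟩
  · have hcs : cs.takeWhile (· != '\n') = cs := by
      have := List.takeWhile_append_dropWhile (p := (· != '\n')) (l := cs)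
      rw [hd] at this; simpa using this
    rw [pvSplitNl_nil_eq cs hd, pvG_nil_eq p doc cs hd]
    simp only [pvAFindC]
    by_cases hl : PySem.Chars.isIn p (cs.takeWhile (· != '\n')) = true
    · rw [if_pos hl, if_pos hl]
      simp only [List.take_succ_cons, List.take_nil, List.drop_succ_cons, List.drop_nil,
        List.cons_append, List.nil_append]
      rw [pvJoin_cons, pvJoin_cons]
      simp [pvPad_toNat]
    · rw [if_neg hl, if_neg hl]
      rw [pvJoin_cons]
      simpa using hcs
  · have hlt : t.length < cs.length := by
      have := List.length_dropWhile_le (· != '\n') cs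
      rw [hd] at this; simp at this; omega
    have hc : c = '\n' := by
      have := pvDropWhile_head (· != '\n') cs c t hd
      simpa using this
    subst hc
    have hcs : cs = cs.takeWhile (· != '\n') ++ '\n' :: t := by
      have := List.takeWhile_append_dropWhile (p := (· != '\n')) (l := cs)
      rw [hd] at this; exact this.symm
    rw [pvSplitNl_cons_eq cs '\n' t hd, pvG_cons_eq p doc cs '\n' t hd]
    simp only [pvAFindC]
    by_cases hl : PySem.Chars.isIn p (cs.takeWhile (· != '\n')) = true
    · rw [if_pos hl, if_pos hl]
      simp only [List.take_succ_cons, List.take_zero, List.drop_succ_cons, List.drop_zero,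
        List.cons_append, List.nil_append]
      rw [pvJoin_cons, pvJoin_cons, if_neg (pvSplitNl_ne_nil t), pvJoin_splitNl t]
      simp [pvPad_toNat]
    · rw [if_neg hl, if_neg hl, pvAFindC_shift p doc (pvSplitNl t) 0]
      have ih := pvCentral p doc t
      rcases hF : pvAFindC p doc (pvSplitNl t) 0 with _ | ⟨i, d⟩
      · rw [hF] at ih
        simp only [Option.map_none]
        rw [pvJoin_cons, if_neg (pvSplitNl_ne_nil t)]
        simp only at ih
        rw [ih]
        rcases hG : pvG p doc t with _ | ⟨o⟩
        · simp [← hcs]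
        · simp
      · rw [hF] at ih
        simp only [Option.map_some]
        simp only [List.take_succ_cons, List.drop_succ_cons, List.cons_append]
        rw [pvJoin_cons]
        have hne : (pvSplitNl t).take (i + 1) ++ d :: (pvSplitNl t).drop (i + 1) ≠ [] := by
          simp
        rw [if_neg hne]
        simp only at ih
        rw [ih]
        rcases hG : pvG p doc t with _ | ⟨o⟩
        · simp [← hcs]
        · simp
termination_by cs.length

theorem pvPartNl_nil_eq (cs : List Char) (hd : cs.dropWhile (· != '\n') = []) :
    pvPartNl cs = (cs.takeWhile (· != '\n'), false, []) := by
  unfold pvPartNl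
  rw [hd]

theorem pvPartNl_cons_eq (cs : List Char) (c : Char) (t : List Char)
    (hd : cs.dropWhile (· != '\n') = c :: t) :
    pvPartNl cs = (cs.takeWhile (· != '\n'), true, t) := by
  unfold pvPartNl
  rw [hd]

theorem pvBLoop_eq_G (p doc : List Char) (rest : List Char) : ∀ (pieces : List (List Char)),
    pvBLoop p doc pieces rest = (pvG p doc rest).map (fun o => (pieces.flatten) ++ o) := by
  intro pieces
  rcases hd : rest.dropWhile (· != '\n') with _ | ⟨c, t⟩
  · rw [pvBLoop]
    split
    rename_i head sep tail heq
    rw [pvPartNl_nil_eq rest hd] at heq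
    cases heq
    rw [pvG_nil_eq p doc rest hd]
    by_cases hl : PySem.Chars.isIn p (rest.takeWhile (· != '\n')) = true
    · rw [if_pos hl, if_pos hl]
      simp [pvJoin_flatten]
    · rw [if_neg hl, if_neg hl]
      simp
  · have hlt : t.length < rest.length := by
      have := List.length_dropWhile_le (· != '\n') rest
      rw [hd] at this; simp at this; omega
    rw [pvBLoop]
    split
    rename_i head sep tail heq
    rw [pvPartNl_cons_eq rest c t hd] at heq
    cases heq
    rw [pvG_cons_eq p doc rest c t hd]
    by_cases hl : PySem.Chars.isIn p (rest.takeWhile (· != '\n')) = true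
    · rw [if_pos hl, if_pos hl]
      simp [pvJoin_flatten]
    · rw [if_neg hl, if_neg hl]
      rw [if_neg (by simp : ¬((!true) = true))]
      rw [pvBLoop_eq_G p doc t (pieces ++ [rest.takeWhile (· != '\n') ++ ['\n']])]
      rcases hG : pvG p doc t with _ | ⟨o⟩
      · simp
      · simp
termination_by rest.length

-- ===== VERDICT (by name: the statement is the Claim_ definition above) =====
theorem insert_docstring_py_spec : Claim_equal_insert_docstring_py := by
  intro content func docstring _hdom _hpre
  unfold Spec_insert_docstring_py insert_docstring_py insert_docstring_py_alt
  rcases hname : (PySem.Dict.mk func).get? "name" with _ | ⟨name⟩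
  · simp
  · have hsplit : PySem.Str.split? content "\n" = some ((pvSplitNl content.toList).map String.ofList) := by
      simp only [PySem.Str.split?, PySem.Chars.split?]
      rw [show "\n".toList = ['\n'] from rfl]
      rw [if_neg (by simp)]
      rw [pvSplitOn_eq]
      rfl
    rw [hsplit]
    simp only [Option.getD_some]
    rw [pvAFind_map ("def " ++ name) docstring (pvSplitNl content.toList) 0]
    rw [pvBLoop_eq_G ("def " ++ name).toList docstring.toList content.toList []]
    have hmapmap : ∀ (L : List (List Char)), (L.map String.ofList).map String.toList = L := by
      intro L
      simp only [List.map_map]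
      simp [Function.comp_def]
    have hjoinmap : ∀ (L : List (List Char)),
        PySem.Str.join "\n" (L.map String.ofList) = String.ofList (PySem.Chars.join ['\n'] L) := by
      intro L
      simp only [PySem.Str.join]
      rw [show "\n".toList = ['\n'] from rfl, hmapmap]
    have hcent := pvCentral ("def " ++ name).toList docstring.toList content.toList
    rcases hF : pvAFindC ("def " ++ name).toList docstring.toList (pvSplitNl content.toList) 0 with _ | ⟨i, d⟩
    · rw [hF] at hcent
      simp only at hcent
      rcases hG : pvG ("def " ++ name).toList docstring.toList content.toList with _ | ⟨o⟩ <;>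
        rw [hG] at hcent
      · simp only [Option.getD_none] at hcent
        simp only [Option.map_none]
        rw [hjoinmap, hcent, String.ofList_toList]
      · simp only [Option.getD_some] at hcent
        simp only [Option.map_none, Option.map_some]
        rw [hjoinmap, hcent]
        simp
    · rw [hF] at hcent
      simp only at hcent
      have hins : PySem.List.insert ((pvSplitNl content.toList).map String.ofList) ((i : Int) + 1) (String.ofList d)
          = (((pvSplitNl content.toList).take (i + 1) ++ d :: (pvSplitNl content.toList).drop (i + 1)).map String.ofList) := by
        rw [show ((i : Int) + 1) = (((i + 1 : Nat) : Int)) from by push_cast; ring]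
        rw [pvInsert_nat]
        simp [List.map_take, List.map_drop]
      rcases hG : pvG ("def " ++ name).toList docstring.toList content.toList with _ | ⟨o⟩ <;>
        rw [hG] at hcent
      · simp only [Option.getD_none] at hcent
        simp only [Option.map_none, Option.map_some]
        rw [hins, hjoinmap, hcent, String.ofList_toList]
      · simp only [Option.getD_some] at hcent
        simp only [Option.map_some]
        rw [hins, hjoinmap, hcent]
        simp
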